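-- pv_equiv track=rewrite | github.com/georgang/SARS-CoV2-mut-fitness | human_data/explore_human_data.py | find_string_occurrences
-- ===== SOURCE A (Python) =====
-- def find_string_occurrences(arr):
--     result = []
--
--     first_occurrence = 1
--     current_string = arr[0]
--
--     for i in range(1, len(arr)):
--         if arr[i] != current_string:
--             result.append((first_occurrence, i, current_string))
--             current_string = arr[i]
--             first_occurrence = i + 1
--
--     result.append((first_occurrence, len(arr), current_string))  # Capture the last segment
--
--     return result
-- ===== SOURCE B (Python) =====
-- def find_string_occurrences(arr):
--     cuts = [i for i in range(1, len(arr)) if arr[i] != arr[i - 1]]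
--     starts = [0] + cuts
--     ends = cuts + [len(arr)]
--     return [(s + 1, e, arr[s]) for s, e in zip(starts, ends)]
-- ===== Notes on version B (the rewrite author's own statement) =====
-- stated objective: alternative
-- what changed: Replaces A's carried-state run tracking (current value + start index updated inside one loop) by two explicit passes: first materialize the list of boundary indices where adjacent elements differ, then pair consecutive boundaries (0-prepended starts vs len-appended ends) and read each segment's value back from the array.
import Mathlib
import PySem

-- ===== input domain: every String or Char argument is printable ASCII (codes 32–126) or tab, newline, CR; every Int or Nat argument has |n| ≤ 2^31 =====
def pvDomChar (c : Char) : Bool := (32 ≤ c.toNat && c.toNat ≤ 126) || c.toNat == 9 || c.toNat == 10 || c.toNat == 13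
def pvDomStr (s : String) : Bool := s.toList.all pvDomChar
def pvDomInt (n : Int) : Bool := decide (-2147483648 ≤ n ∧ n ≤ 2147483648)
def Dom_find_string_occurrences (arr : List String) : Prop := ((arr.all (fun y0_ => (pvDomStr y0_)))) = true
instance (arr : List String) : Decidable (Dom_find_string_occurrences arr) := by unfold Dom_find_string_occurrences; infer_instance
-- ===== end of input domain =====

-- B replaces A's single carried-state loop by a boundary-index pass plus a pairing pass; same O(n) cost.

-- ===== PORT A =====
-- loop body of A: state = (result, first_occurrence, current_string), pair = (i, arr[i])
def fsoStep (s : List (Int × Int × String) × Int × String) (p : Int × String) :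
    List (Int × Int × String) × Int × String :=
  if p.2 ≠ s.2.2 then (s.1 ++ [(s.2.1, p.1, s.2.2)], p.1 + 1, p.2) else s

def find_string_occurrences (arr : List String) : List (Int × Int × String) :=
  match arr with
  | [] => []   -- Python: arr[0] raises IndexError here; excluded by Pre_
  | a0 :: rest =>
    -- 'for i in range(1, len(arr)): … arr[i] …' visits exactly the pairs enumerate(rest, 1)
    let s := (PySem.List.enumerate rest 1).foldl fsoStep ([], 1, a0)
    s.1 ++ [(s.2.1, (arr.length : Int), s.2.2)]

-- ===== PORT B =====
def find_string_occurrences_alt (arr : List String) : List (Int × Int × String) :=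
  -- cuts = [i for i in range(1, len(arr)) if arr[i] != arr[i-1]]: the pairs (arr[i], arr[i-1])
  -- for i in 1..len-1 are exactly enumerate(zip(arr.drop 1, arr), 1)
  let cuts : List Int := (PySem.List.enumerate (List.zip (arr.drop 1) arr) 1).filterMap
      (fun p => if p.2.1 ≠ p.2.2 then some p.1 else none)
  let starts := (0 : Int) :: cuts
  let ends := cuts ++ [(arr.length : Int)]
  (List.zip starts ends).map
    (fun se => (se.1 + 1, se.2, PySem.List.pyGetD arr se.1 ""))  -- arr[s]; in range whenever arr ≠ []

-- ===== PRECONDITION & SPEC =====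
-- Pre_ excludes exactly the empty list, on which Python A (arr[0]) raises IndexError (and so does B).
def Pre_find_string_occurrences (arr : List String) : Prop := arr ≠ []
instance (arr : List String) : Decidable (Pre_find_string_occurrences arr) := by
  unfold Pre_find_string_occurrences; infer_instance

def pvWitness_find_string_occurrences : List String := ["a", "a", "b"]

def Spec_find_string_occurrences (arr : List String) (out : List (Int × Int × String)) : Prop := out = find_string_occurrences_alt arr
instance (arr : List String) (out : List (Int × Int × String)) : Decidable (Spec_find_string_occurrences arr out) := by unfold Spec_find_string_occurrences; infer_instance

-- ===== CLAIM (what is proved, stated in full; the proofs are below) =====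
def Claim_equal_find_string_occurrences : Prop := ∀ (arr : List String), Dom_find_string_occurrences arr → Pre_find_string_occurrences arr → Spec_find_string_occurrences arr (find_string_occurrences arr)

-- ===== LEMMAS AND PROOFS =====

-- reference run-length segmentation: cur = current run value, fo = its 1-based start,
-- k = python index of the head of the remaining list
def rleRef (cur : String) (fo : Int) (k : Int) : List String → List (Int × Int × String)
  | [] => [(fo, k, cur)]
  | x :: xs => if x ≠ cur then (fo, k, cur) :: rleRef x (k + 1) (k + 1) xs
               else rleRef cur fo (k + 1) xs

-- A's fold equals the reference
lemma foldA_eq (xs : List String) : ∀ (k : Int) (res : List (Int × Int × String)) (fo : Int) (cur : String),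
    (let s := (PySem.List.enumerate xs k).foldl fsoStep (res, fo, cur)
     s.1 ++ [(s.2.1, k + xs.length, s.2.2)]) = res ++ rleRef cur fo k xs := by
  induction xs with
  | nil => intro k res fo cur; simp [PySem.List.enumerate_nil, rleRef]
  | cons x xs ih =>
    intro k res fo cur
    simp only [PySem.List.enumerate_cons, List.foldl_cons, rleRef]
    by_cases hx : x = cur
    · simp only [fsoStep, hx, ne_eq, not_true_eq_false]
      have := ih (k + 1) res fo cur
      simp only [List.length_cons] at *
      push_cast at this ⊢
      ring_nf at this ⊢
      exact this
    · simp only [fsoStep, ne_eq, hx, not_false_eq_true, if_pos]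
      have := ih (k + 1) (res ++ [(fo, k, cur)]) (k + 1) x
      simp only [List.length_cons, List.append_assoc, List.cons_append, List.nil_append] at *
      push_cast at this ⊢
      ring_nf at this ⊢
      exact this

-- reference boundary list: prev = previous element, k = python index of the head of xs
def cutsF (prev : String) (k : Int) : List String → List Int
  | [] => []
  | x :: xs => if x ≠ prev then k :: cutsF x (k + 1) xs else cutsF x (k + 1) xs

lemma cuts_eq (xs : List String) : ∀ (prev : String) (k : Int),
    (PySem.List.enumerate (List.zip xs (prev :: xs)) k).filterMap
      (fun p => if p.2.1 ≠ p.2.2 then some p.1 else none) = cutsF prev k xs := by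
  induction xs with
  | nil => intro prev k; simp [PySem.List.enumerate_nil, cutsF]
  | cons x xs ih =>
    intro prev k
    simp only [List.zip_cons_cons, PySem.List.enumerate_cons, List.filterMap_cons, cutsF]
    by_cases hx : x = prev
    · have h1 := ih x (k + 1)
      simp only [ne_eq, ite_not] at h1
      subst hx
      simp [h1]
    · have h1 := ih x (k + 1)
      simp only [ne_eq, ite_not] at h1
      simp [hx, h1]

-- pairing pass over the boundary list equals the reference
lemma mapSeg_eq (arr : List String) (xs : List String) (cur : String) (s k : Nat)
    (hdrop : arr.drop k = xs) (hk : k ≤ arr.length) (hs : arr[s]? = some cur) :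
    (List.zip ((s : Int) :: cutsF cur k xs) (cutsF cur k xs ++ [(arr.length : Int)])).map
      (fun se => (se.1 + 1, se.2, PySem.List.pyGetD arr se.1 "")) =
    rleRef cur ((s : Int) + 1) (k : Int) xs := by
  induction xs generalizing cur s k with
  | nil =>
    have hklen : k = arr.length := le_antisymm hk (by simpa using List.drop_eq_nil_iff.mp hdrop)
    subst hklen
    simp [cutsF, rleRef, PySem.List.pyGetD_natCast, List.getD_eq_getElem?_getD, hs]
  | cons x xs ih =>
    have hklt : k < arr.length := by
      by_contra h
      rw [List.drop_eq_nil_of_le (by omega)] at hdrop; simp at hdrop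
    have hx' : arr[k]? = some x := by
      have h0 : (arr.drop k)[0]? = some x := by rw [hdrop]; rfl
      rw [List.getElem?_drop] at h0
      simpa using h0
    have hdrop' : arr.drop (k + 1) = xs := by
      rw [← List.tail_drop, hdrop, List.tail_cons]
    simp only [cutsF, rleRef]
    by_cases hxc : x = cur
    · simp only [hxc, ne_eq, not_true_eq_false]
      have := ih cur s (k + 1) hdrop' (by omega) hs
      simpa [Nat.cast_add] using this
    · simp only [ne_eq, hxc, not_false_eq_true, if_pos]
      have hrec := ih x k (k + 1) hdrop' (by omega) hx'
      simp only [List.zip_cons_cons, List.cons_append, List.map_cons]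
      rw [show ((k : Nat) : Int) + 1 = ((k + 1 : Nat) : Int) by push_cast; ring] at hrec ⊢
      simp only [hrec]
      simp [PySem.List.pyGetD_natCast, List.getD_eq_getElem?_getD, hs]

-- ===== VERDICT (by name: the statement is the Claim_ definition above) =====
theorem find_string_occurrences_spec : Claim_equal_find_string_occurrences := by
  intro arr _ hpre
  unfold Spec_find_string_occurrences
  match arr, hpre with
  | a0 :: rest, _ =>
    show find_string_occurrences (a0 :: rest) = find_string_occurrences_alt (a0 :: rest)
    have hA := foldA_eq rest 1 [] 1 a0
    have hB1 := cuts_eq rest a0 1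
    have hB2 := mapSeg_eq (a0 :: rest) rest a0 0 1 (by simp) (by simp) (by simp)
    have hlen : (((a0 :: rest).length : Nat) : Int) = 1 + (rest.length : Int) := by
      push_cast [List.length_cons]; ring
    rw [hlen] at hB2
    norm_num at hB2
    simp only [find_string_occurrences, find_string_occurrences_alt, List.drop_one,
      List.tail_cons, hB1, hlen]
    rw [hA, hB2]
    simp
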